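-- pv_equiv track=rewrite | github.com/DavidRalf/Tree_Tracking | src/utility/synchronize.py | clean_indices
-- ===== SOURCE A (Python) =====
-- def clean_indices(gps_with_image):
--     # gps_with_image = [[timestamp, image, [latitude,longitude]]]
--     #
--     # return start,end,[[timestamp, image, [latitude,longitude]]]
--     start_index = 0
--     start = False
--     end_index = -1
--     for index, entry in enumerate(gps_with_image):
--         if entry is None and start:
--             end_index = index - 1
--             break
--         if entry is None:
--             continue
--         if not start:
--             start = True
--             start_index = index
--             continue
--         end_index = index
--     return start_index, end_index
-- ===== SOURCE B (Python) =====
-- def clean_indices(gps_with_image):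
--     # Two-phase decomposition: find the start of the first non-None run,
--     # then measure the run's length and compute the end index arithmetically.
--     start = next((i for i, e in enumerate(gps_with_image) if e is not None), None)
--     if start is None:
--         return 0, -1
--     run = gps_with_image[start:]
--     length = next((j for j, e in enumerate(run) if e is None), len(run))
--     return start, start + length - 1
-- ===== Notes on version B (the rewrite author's own statement) =====
-- stated objective: simpler
-- what changed: Replaces A's single-pass state machine (start flag, running end_index, break) by a two-phase decomposition: locate the first non-None index, measure the run's length, and compute end = start + length - 1.
-- intended difference: On lists whose first non-None element is the last element (leading Nones then one non-None at the end), A returns (start, -1) because its end_index is never updated for a single-element run that reaches the end of the list, while B returns (start, start) — the intended end index of that one-element run, and the same value A itself returns when the run is followed by a None. — e.g. on clean_indices([none, some [1]]): A returns (1, -1), B returns (1, 1)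
import Mathlib
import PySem

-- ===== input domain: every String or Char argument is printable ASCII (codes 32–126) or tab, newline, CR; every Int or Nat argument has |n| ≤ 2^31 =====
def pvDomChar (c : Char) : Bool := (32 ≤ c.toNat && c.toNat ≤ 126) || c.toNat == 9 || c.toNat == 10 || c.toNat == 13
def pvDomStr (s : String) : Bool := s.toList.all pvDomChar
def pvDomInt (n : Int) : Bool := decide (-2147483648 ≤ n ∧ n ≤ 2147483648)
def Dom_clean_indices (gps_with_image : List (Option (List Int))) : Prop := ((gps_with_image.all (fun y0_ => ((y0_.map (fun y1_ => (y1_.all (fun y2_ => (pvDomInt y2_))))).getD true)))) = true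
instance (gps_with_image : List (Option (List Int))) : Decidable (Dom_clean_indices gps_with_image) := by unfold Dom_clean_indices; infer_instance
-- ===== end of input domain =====

-- B replaces A's one-pass flag/break state machine by a two-phase find-start +
-- run-length decomposition (simpler); on lists where the first non-None element
-- is the last element, A returns (start, -1) and B returns the intended (start, start).


-- ===== PORT A =====
-- A's for-loop over enumerate, with its break, as structural recursion over the
-- list carrying the loop state (index, start_index, start, end_index)
def cleanA_loop : List (Option (List Int)) → Int → Int → Bool → Int → Int × Int
  | [], _, start_index, _, end_index => (start_index, end_index)
  | entry :: rest, index, start_index, start, end_index =>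
    match entry with
    | none =>
      if start then (start_index, index - 1)
      else cleanA_loop rest (index + 1) start_index start end_index
    | some _ =>
      if !start then cleanA_loop rest (index + 1) index true end_index
      else cleanA_loop rest (index + 1) start_index start index

def clean_indices (gps_with_image : List (Option (List Int))) : Int × Int :=
  cleanA_loop gps_with_image 0 0 false (-1)

-- ===== PORT B =====
-- next((i for i, e in enumerate(l) if e is not None), None)
def bFindStart : List (Option (List Int)) → Option Nat
  | [] => none
  | none :: rest => (bFindStart rest).map (· + 1)
  | some _ :: _ => some 0

-- next((j for j, e in enumerate(run) if e is None), len(run))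
def bNoneIdx : List (Option (List Int)) → Nat
  | [] => 0
  | none :: _ => 0
  | some _ :: rest => bNoneIdx rest + 1

def clean_indices_alt (gps_with_image : List (Option (List Int))) : Int × Int :=
  match bFindStart gps_with_image with
  | none => (0, -1)
  | some start =>
    -- gps_with_image[start:] with 0 ≤ start ≤ len is exactly List.drop start
    let run := gps_with_image.drop start
    let length := bNoneIdx run
    ((start : Int), (start : Int) + (length : Int) - 1)

-- ===== PRECONDITION & SPEC =====
-- On lists whose first non-None element is the last element, A returns (start, -1)
-- because its end_index is never updated for a single-element run reaching the end
-- of the list, while B returns (start, start) — the intended end index of that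
-- one-element run, and the same value A itself returns when a None follows the run.
def D_clean_indices (gps_with_image : List (Option (List Int))) : Prop :=
  gps_with_image.dropLast.all (fun e => e = none) = true ∧
  gps_with_image.getLast?.join.isSome = true
instance (gps_with_image : List (Option (List Int))) : Decidable (D_clean_indices gps_with_image) := by unfold D_clean_indices; infer_instance

def Spec_clean_indices (gps_with_image : List (Option (List Int))) (out : Int × Int) : Prop :=
  ¬ D_clean_indices gps_with_image → out = clean_indices_alt gps_with_image
instance (gps_with_image : List (Option (List Int))) (out : Int × Int) : Decidable (Spec_clean_indices gps_with_image out) := by unfold Spec_clean_indices; infer_instance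

def pvDiffWitness_clean_indices : List (Option (List Int)) := [none, some [1]]
def pvDiffWitnessOut_clean_indices : (Int × Int) × (Int × Int) := ((1, -1), (1, 1))

-- ===== CLAIM (what is proved, stated in full; the proofs are below) =====
def Claim_unchanged_clean_indices : Prop := ∀ (gps_with_image : List (Option (List Int))), Dom_clean_indices gps_with_image → Spec_clean_indices gps_with_image (clean_indices gps_with_image)
def Claim_changed_clean_indices : Prop := Dom_clean_indices (pvDiffWitness_clean_indices) ∧ D_clean_indices (pvDiffWitness_clean_indices) ∧ clean_indices (pvDiffWitness_clean_indices) = pvDiffWitnessOut_clean_indices.1 ∧ clean_indices_alt (pvDiffWitness_clean_indices) = pvDiffWitnessOut_clean_indices.2 ∧ pvDiffWitnessOut_clean_indices.1 ≠ pvDiffWitnessOut_clean_indices.2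
def Claim_exact_clean_indices : Prop := ∀ (gps_with_image : List (Option (List Int))), Dom_clean_indices gps_with_image → D_clean_indices gps_with_image → clean_indices gps_with_image ≠ clean_indices_alt gps_with_image

-- ===== LEMMAS AND PROOFS =====

-- the started loop: stops at the first None (or at the end) with end = i + runlen - 1
theorem cleanA_loop_started (r : List (Option (List Int))) :
    ∀ (i s e : Int), cleanA_loop r i s true e =
      if r = [] then (s, e) else (s, i + (bNoneIdx r : Int) - 1) := by
  induction r with
  | nil => intro i s e; simp [cleanA_loop]
  | cons a rest ih =>
    intro i s e
    cases a with
    | none => simp [cleanA_loop, bNoneIdx]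
    | some x =>
      simp only [cleanA_loop, Bool.not_true, Bool.false_eq_true, if_false]
      rw [ih]
      by_cases hr : rest = []
      · subst hr; simp [bNoneIdx]
      · simp only [if_neg hr, bNoneIdx, List.cons_ne_nil, if_false]
        rw [Prod.mk.injEq]
        constructor
        · rfl
        · push_cast; ring

-- full characterisation of A's loop from the initial state
theorem cleanA_loop_char (l : List (Option (List Int))) :
    ∀ (i s0 : Int), cleanA_loop l i s0 false (-1) =
      match bFindStart l with
      | none => (s0, -1)
      | some j =>
        if l.drop (j + 1) = [] then (i + (j : Int), -1)
        else (i + (j : Int), i + (j : Int) + (bNoneIdx (l.drop j) : Int) - 1) := by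
  induction l with
  | nil => intro i s0; simp [cleanA_loop, bFindStart]
  | cons a rest ih =>
    intro i s0
    cases a with
    | some x =>
      simp only [cleanA_loop, Bool.not_false, if_true, bFindStart]
      rw [cleanA_loop_started]
      by_cases hr : rest = []
      · subst hr; simp
      · simp only [if_neg hr, List.drop_succ_cons, List.drop_zero, bNoneIdx]
        rw [Prod.mk.injEq]
        constructor
        · push_cast; ring
        · push_cast; ring
    | none =>
      simp only [cleanA_loop, Bool.false_eq_true, if_false, bFindStart]
      rw [ih]
      cases h : bFindStart rest with
      | none => simp
      | some j =>
        simp only [Option.map_some, List.drop_succ_cons]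
        split
        · rw [Prod.mk.injEq]; exact ⟨by push_cast; ring, rfl⟩
        · rw [Prod.mk.injEq]; exact ⟨by push_cast; ring, by push_cast; ring⟩

theorem getLast?_cons_ne_nil {α : Type} (a : α) (l : List α) (h : l ≠ []) :
    (a :: l).getLast? = l.getLast? := by
  cases l with
  | nil => exact absurd rfl h
  | cons b r => simp [List.getLast?_cons_cons]

-- 'first non-None is last' implies D_
theorem D_of_drop (l : List (Option (List Int))) :
    ∀ (j : Nat), bFindStart l = some j → l.drop (j + 1) = [] → D_clean_indices l := by
  induction l with
  | nil => intro j h; simp [bFindStart] at h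
  | cons a rest ih =>
    intro j h hd
    cases a with
    | some x =>
      simp only [bFindStart, Option.some.injEq] at h
      subst h
      simp only [List.drop_succ_cons, List.drop_zero] at hd
      subst hd
      constructor <;> simp [List.getLast?]
    | none =>
      simp only [bFindStart] at h
      cases hr : bFindStart rest with
      | none => rw [hr] at h; simp at h
      | some j' =>
        rw [hr] at h
        simp only [Option.map_some, Option.some.injEq] at h
        subst h
        simp only [List.drop_succ_cons] at hd
        have hD := ih j' hr hd
        have hne : rest ≠ [] := by
          intro hnil; rw [hnil] at hr; simp [bFindStart] at hr
        obtain ⟨h1, h2⟩ := hD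
        constructor
        · rw [List.dropLast_cons_of_ne_nil hne]
          simpa using h1
        · rwa [getLast?_cons_ne_nil _ _ hne]

-- D_ implies 'first non-None is last'
theorem drop_of_D (l : List (Option (List Int))) :
    D_clean_indices l → ∃ j : Nat, bFindStart l = some j ∧ l.drop (j + 1) = [] := by
  induction l with
  | nil => intro h; obtain ⟨_, h2⟩ := h; simp [List.getLast?] at h2
  | cons a rest ih =>
    intro h
    obtain ⟨h1, h2⟩ := h
    cases hrest : rest with
    | nil =>
      subst hrest
      cases a with
      | none => simp [List.getLast?] at h2
      | some x => exact ⟨0, by simp [bFindStart], by simp⟩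
    | cons b r =>
      have hne : rest ≠ [] := by rw [hrest]; simp
      rw [← hrest] at *
      rw [List.dropLast_cons_of_ne_nil hne] at h1
      simp only [List.all_cons, Bool.and_eq_true, decide_eq_true_eq] at h1
      obtain ⟨ha, h1'⟩ := h1
      rw [getLast?_cons_ne_nil _ _ hne] at h2
      obtain ⟨j, hj, hdj⟩ := ih ⟨by simpa using h1', h2⟩
      subst ha
      exact ⟨j + 1, by simp [bFindStart, hj], by simpa using hdj⟩

-- if the run starts, its length is at least 1
theorem bNoneIdx_drop_pos (l : List (Option (List Int))) :
    ∀ (j : Nat), bFindStart l = some j → 1 ≤ bNoneIdx (l.drop j) := by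
  induction l with
  | nil => intro j h; simp [bFindStart] at h
  | cons a rest ih =>
    intro j h
    cases a with
    | some x =>
      simp only [bFindStart, Option.some.injEq] at h
      subst h
      simp [bNoneIdx]
    | none =>
      simp only [bFindStart] at h
      cases hr : bFindStart rest with
      | none => rw [hr] at h; simp at h
      | some j' =>
        rw [hr] at h
        simp only [Option.map_some, Option.some.injEq] at h
        subst h
        simpa using ih j' hr

-- ===== VERDICT (by name: the statement is the Claim_ definition above) =====
theorem clean_indices_spec : Claim_unchanged_clean_indices := by
  intro l _ hnd
  unfold clean_indices clean_indices_alt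
  rw [cleanA_loop_char]
  cases h : bFindStart l with
  | none => simp
  | some j =>
    simp only
    split
    · exact absurd (D_of_drop l j h (by assumption)) hnd
    · simp

theorem clean_indices_changed : Claim_changed_clean_indices := by
  unfold Claim_changed_clean_indices; decide

theorem clean_indices_tight : Claim_exact_clean_indices := by
  intro l _ hD
  obtain ⟨j, hj, hdj⟩ := drop_of_D l hD
  unfold clean_indices clean_indices_alt
  rw [cleanA_loop_char, hj]
  simp only [if_pos hdj]
  intro hcontra
  have h2 := congrArg Prod.snd hcontra
  simp only at h2
  have hpos := bNoneIdx_drop_pos l j hj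
  omega
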